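-- pv_equiv track=rewrite | github.com/ShuvalovAnthony/ege | 9/63025/63025.py | check
-- ===== SOURCE A (Python) =====
-- def check(row):
--     row = sorted(row)
--     summa_povtor = 0
--
--     for i in row:
--         if row.count(i) > 1:
--             summa_povtor += i
--
--     if (
--         (len(set(row)) != len(row)) and
--         (row[-1] != row[-2]) and
--         (summa_povtor > row[-1])
--     ): return True
--
--     return False
-- ===== SOURCE B (Python) =====
-- def check(row):
--     row = sorted(row)
--     summa = 0
--     has_dup = False
--     n = len(row)
--     i = 0
--     while i < n:
--         j = i + 1
--         while j < n and row[j] == row[i]: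
--             j += 1
--         if j - i >= 2:
--             summa += row[i] * (j - i)
--             has_dup = True
--         i = j
--     return has_dup and row[-1] != row[-2] and summa > row[-1]
-- ===== Notes on version B (the rewrite author's own statement) =====
-- stated objective: faster
-- what changed: Replaces the per-element row.count scan (and the set construction for duplicate detection) with a single left-to-right grouping pass over the sorted list that accumulates v*L for each run of length L>=2 and a has_dup flag.
import Mathlib
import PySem

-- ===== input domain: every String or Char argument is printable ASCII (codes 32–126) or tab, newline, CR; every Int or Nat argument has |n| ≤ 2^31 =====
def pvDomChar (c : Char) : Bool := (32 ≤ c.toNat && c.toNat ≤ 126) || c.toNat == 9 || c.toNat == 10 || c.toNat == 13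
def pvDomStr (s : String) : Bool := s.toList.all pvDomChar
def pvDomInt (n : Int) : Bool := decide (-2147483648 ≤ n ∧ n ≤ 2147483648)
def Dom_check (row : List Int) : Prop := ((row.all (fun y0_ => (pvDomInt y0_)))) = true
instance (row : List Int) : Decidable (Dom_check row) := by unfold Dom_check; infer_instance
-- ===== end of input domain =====

-- B replaces A's per-element count scan with one grouping pass over the sorted list (faster; return value only).

-- ===== PORT A =====
def check (row : List Int) : Bool :=
  let r := PySem.List.sorted row (fun x => x) false
  let summa := r.foldl (fun acc i => if PySem.List.count r i > 1 then acc + i else acc) 0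
  if decide ((PySem.Set.ofList r).length ≠ r.length)
       && (match PySem.List.pyGet? r (-1), PySem.List.pyGet? r (-2) with
           | some a, some b => decide (a ≠ b) && decide (summa > a)
           | _, _ => false)   -- unreachable: the duplicate test guarantees length ≥ 2 (Python's `and` short-circuits)
  then true else false

-- ===== PORT B =====
-- the inner `while j < n and row[j] == row[i]` scan of a run = takeWhile/dropWhile of the tail
def groupPass : List Int → Int → Bool → Int × Bool
  | [], summa, hasDup => (summa, hasDup)
  | x :: xs, summa, hasDup =>
      let run := xs.takeWhile (fun y => y == x)
      let rest := xs.dropWhile (fun y => y == x)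
      if 2 ≤ run.length + 1 then
        groupPass rest (summa + x * (run.length + 1 : Int)) true
      else
        groupPass rest summa hasDup
termination_by l _ _ => l.length
decreasing_by
  all_goals
    simp only [List.length_cons]
    exact Nat.lt_succ_of_le (List.length_dropWhile_le _ _)

def check_alt (row : List Int) : Bool :=
  let r := PySem.List.sorted row (fun x => x) false
  let p := groupPass r 0 false
  p.2 && (match PySem.List.pyGet? r (-1) with
          | none => false
          | some a =>
            match PySem.List.pyGet? r (-2) with
            | none => false
            | some b => decide (a ≠ b) && decide (p.1 > a))

-- ===== PRECONDITION & SPEC =====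
def Spec_check (row : List Int) (out : Bool) : Prop := out = check_alt row
instance (row : List Int) (out : Bool) : Decidable (Spec_check row out) := by unfold Spec_check; infer_instance

-- ===== CLAIM (what is proved, stated in full; the proofs are below) =====
def Claim_equal_check : Prop := ∀ (row : List Int), Dom_check row → Spec_check row (check row)

-- ===== LEMMAS AND PROOFS =====

lemma ite_true_false_eq (b : Bool) : (if b = true then true else false) = b := by
  cases b <;> rfl

lemma dropWhile_head_false {p : Int → Bool} : ∀ (l : List Int) (z : Int) (zs : List Int),
    l.dropWhile p = z :: zs → p z = false := by
  intro l
  induction l with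
  | nil => intro z zs h; simp at h
  | cons a l ih =>
    intro z zs h
    rw [List.dropWhile_cons] at h
    by_cases hp : p a
    · rw [if_pos hp] at h; exact ih _ _ h
    · rw [if_neg hp] at h
      cases h
      simpa using hp

-- A's summa as a sum: each element of r contributes itself when its count in r exceeds 1
def asum (r : List Int) : Int :=
  (r.map (fun i => if PySem.List.count r i > 1 then i else 0)).sum

lemma foldl_if_sum (R : List Int) (l : List Int) (s : Int) :
    l.foldl (fun acc i => if PySem.List.count R i > 1 then acc + i else acc) s
      = s + (l.map (fun i => if PySem.List.count R i > 1 then i else 0)).sum := by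
  induction l generalizing s with
  | nil => simp
  | cons x xs ih =>
    simp only [List.foldl_cons, List.map_cons, List.sum_cons, ih]
    split <;> ring

lemma ofList_len_iff (r : List Int) :
    (PySem.Set.ofList r).length = r.length ↔ r.Nodup := by
  constructor
  · intro h
    have hp : (PySem.Set.ofList r).Perm r.dedup :=
      (List.perm_ext_iff_of_nodup (PySem.Set.nodup_ofList r) r.nodup_dedup).2
        (fun x => by simp [PySem.Set.mem_ofList, List.mem_dedup])
    have hlen : r.dedup.length = r.length := by rw [← hp.length_eq]; exact h
    have := (List.dedup_sublist r).eq_of_length hlen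
    rw [← List.dedup_eq_self]; exact this
  · intro h; rw [PySem.Set.ofList_eq_self_of_nodup r h]

lemma asum_decomp (x : Int) (run rest : List Int)
    (hrun : ∀ y ∈ run, y = x) (hrest : ∀ y ∈ rest, x < y) :
    asum (x :: (run ++ rest))
      = (if 1 < run.length + 1 then x * (run.length + 1 : Int) else 0) + asum rest := by
  have hxrest : x ∉ rest := fun h => lt_irrefl x (hrest x h)
  have hxrun : List.count x run = run.length :=
    List.count_eq_length.2 (fun b hb => (hrun b hb).symm)
  have hcx : PySem.List.count (x :: (run ++ rest)) x = run.length + 1 := by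
    rw [PySem.List.count_eq]
    simp [List.count_append, hxrun, List.count_eq_zero.2 hxrest]
  have hcy : ∀ y ∈ rest, PySem.List.count (x :: (run ++ rest)) y = PySem.List.count rest y := by
    intro y hy
    have hxy := hrest y hy
    have hyrun : List.count y run = 0 :=
      List.count_eq_zero.2 (fun h => absurd (hrun y h) (by omega))
    rw [PySem.List.count_eq, PySem.List.count_eq]
    simp [List.count_cons, List.count_append, hyrun]
    omega
  have hrest_map : rest.map (fun i => if PySem.List.count (x :: (run ++ rest)) i > 1 then i else 0)
      = rest.map (fun i => if PySem.List.count rest i > 1 then i else 0) :=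
    List.map_congr_left (fun y hy => by rw [hcy y hy])
  by_cases hr : run = []
  · subst hr
    unfold asum
    simp only [List.nil_append] at hcx hrest_map ⊢
    rw [List.map_cons, List.sum_cons, hrest_map]
    simp [hxrest]
  · have hlen : 0 < run.length := List.length_pos_iff.2 hr
    have hrun_map : run.map (fun i => if PySem.List.count (x :: (run ++ rest)) i > 1 then i else 0)
        = List.replicate run.length x := by
      rw [List.map_congr_left (g := fun _ => x) (fun y hy => ?_), List.map_const']
      rw [hrun y hy, hcx, if_pos (by omega)]
    unfold asum
    simp only [List.map_cons, List.map_append, List.sum_cons, List.sum_append, hcx,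
      hrest_map, hrun_map, List.sum_replicate, if_pos (by omega : run.length + 1 > 1), nsmul_eq_mul]
    ring

lemma nodup_decomp (x : Int) (run rest : List Int)
    (hrun : ∀ y ∈ run, y = x) (hrest : ∀ y ∈ rest, x < y) :
    (x :: (run ++ rest)).Nodup ↔ (run = [] ∧ rest.Nodup) := by
  have hxrest : x ∉ rest := fun h => lt_irrefl x (hrest x h)
  constructor
  · intro h
    rcases hrc : run with _ | ⟨y, ys⟩
    · subst hrc
      exact ⟨rfl, (List.nodup_cons.1 (by simpa using h)).2⟩
    · exfalso
      have hmem : x ∈ run ++ rest := by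
        rw [hrc]
        exact List.mem_append_left _ (by rw [← hrun y (by rw [hrc]; exact List.mem_cons_self)]; simp)
      exact (List.nodup_cons.1 h).1 hmem
  · rintro ⟨rfl, hn⟩
    simp [List.nodup_cons, hxrest, hn]

lemma groupPass_eq (n : Nat) : ∀ (r : List Int), r.length ≤ n → r.Pairwise (· ≤ ·) →
    ∀ (s : Int) (b : Bool), groupPass r s b = (s + asum r, b || decide (¬ r.Nodup)) := by
  induction n with
  | zero =>
    intro r hle _ s b
    have : r = [] := List.eq_nil_of_length_eq_zero (Nat.le_zero.1 hle)
    subst this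
    simp [groupPass, asum]
  | succ m ih =>
    intro r hle hpair s b
    match r with
    | [] => simp [groupPass, asum]
    | x :: xs =>
      have hcons := List.pairwise_cons.1 hpair
      have hall : ∀ y ∈ xs, x ≤ y := hcons.1
      have hxs : xs.Pairwise (· ≤ ·) := hcons.2
      have hsplit : xs.takeWhile (fun y => y == x) ++ xs.dropWhile (fun y => y == x) = xs :=
        List.takeWhile_append_dropWhile
      have hrun : ∀ y ∈ xs.takeWhile (fun y => y == x), y = x := by
        intro y hy
        have := List.mem_takeWhile_imp hy
        simpa using this
      have hrestpair : (xs.dropWhile (fun y => y == x)).Pairwise (· ≤ ·) :=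
        hxs.sublist (List.dropWhile_sublist _)
      have hrest : ∀ y ∈ xs.dropWhile (fun y => y == x), x < y := by
        cases hd : xs.dropWhile (fun y => y == x) with
        | nil => simp
        | cons z zs =>
          have hz_ne : (z == x) = false := dropWhile_head_false xs z zs hd
          have hz_mem : z ∈ xs := (List.dropWhile_sublist _).mem (by rw [hd]; exact List.mem_cons_self)
          have hzx : z ≠ x := by simpa using hz_ne
          have hxz : x < z := lt_of_le_of_ne (hall z hz_mem) (Ne.symm hzx)
          intro y hy
          rcases List.mem_cons.1 hy with rfl | hy'
          · exact hxz
          · have hzy : z ≤ y := by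
              have := List.pairwise_cons.1 (hd ▸ hrestpair)
              exact this.1 y hy'
            exact lt_of_lt_of_le hxz hzy
      have hrestlen : (xs.dropWhile (fun y => y == x)).length ≤ m := by
        have h1 := List.length_dropWhile_le (fun y => y == x) xs
        have h2 : xs.length + 1 ≤ m + 1 := by simpa using hle
        omega
      have hIH := ih (xs.dropWhile (fun y => y == x)) hrestlen hrestpair
      rw [groupPass]
      by_cases hc : 2 ≤ (xs.takeWhile (fun y => y == x)).length + 1
      · rw [if_pos hc, hIH]
        have ha := asum_decomp x _ _ hrun hrest
        have hn := nodup_decomp x _ _ hrun hrest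
        rw [hsplit] at ha hn
        have hne : xs.takeWhile (fun y => y == x) ≠ [] := by
          intro h0
          rw [h0] at hc
          simp only [List.length_nil] at hc
          omega
        rw [Prod.mk.injEq]
        refine ⟨?_, ?_⟩
        · rw [ha, if_pos (by omega)]; ring
        · have : ¬ (x :: xs).Nodup := fun h => hne ((hn.1 h).1)
          simp [this]
      · rw [if_neg hc, hIH]
        have h0 : xs.takeWhile (fun y => y == x) = [] := by
          have := List.length_eq_zero_iff.1 (by omega : (xs.takeWhile (fun y => y == x)).length = 0)
          exact this
        have ha := asum_decomp x _ _ hrun hrest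
        have hn := nodup_decomp x _ _ hrun hrest
        rw [hsplit] at ha hn
        rw [h0] at ha hn
        rw [Prod.mk.injEq]
        refine ⟨?_, ?_⟩
        · rw [ha]; simp
        · have : (x :: xs).Nodup ↔ (xs.dropWhile (fun y => y == x)).Nodup := by
            rw [hn]; simp
          simp [this]

theorem check_spec' (row : List Int) : check row = check_alt row := by
  unfold check check_alt
  simp only []
  have hpair : (PySem.List.sorted row (fun x => x) false).Pairwise (· ≤ ·) :=
    PySem.List.sorted_pairwise row (fun x => x)
  rw [groupPass_eq (PySem.List.sorted row (fun x => x) false).length _ le_rfl hpair 0 false,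
      foldl_if_sum]
  have hdup : decide ((PySem.Set.ofList (PySem.List.sorted row (fun x => x) false)).length ≠ (PySem.List.sorted row (fun x => x) false).length)
      = decide (¬ (PySem.List.sorted row (fun x => x) false).Nodup) :=
    decide_eq_decide.2 (not_congr (ofList_len_iff _))
  rw [hdup]
  simp only [asum, Bool.false_or]
  rw [ite_true_false_eq]
  congr 1
  cases PySem.List.pyGet? (PySem.List.sorted row (fun x => x) false) (-1) <;>
    cases PySem.List.pyGet? (PySem.List.sorted row (fun x => x) false) (-2) <;> rfl

-- ===== VERDICT (by name: the statement is the Claim_ definition above) =====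
theorem check_spec : Claim_equal_check := by
  intro row _
  exact check_spec' row
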